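-- pv_equiv track=rewrite | github.com/JustinNorman02/advent-of-code | 2024/21/21-1.py | path_control
-- ===== SOURCE A (Python) =====
-- def move(sx,sy,tx,ty):
--     mx,my = tx-sx, ty-sy
--
--     path = ""
--
--     if mx < 0:
--             for i in range(abs(mx)):
--                 path += '^'
--
--     else:
--         for i in range(abs(mx)):
--             path += 'v'
--
--     if my < 0:
--         for i in range(abs(my)):
--             path += '<'
--
--     else:
--         for i in range(abs(my)):
--             path += '>'
--
--
--     path += 'A'
--
--     return path
--
-- def path_control(code, pad):
--
--     sx,sy = pad['A']
--
--     path = ""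
--
--     code_snip = code.split('A')
--
--     for u in range(len(code_snip)):
--         code_snip[u] = list(code_snip[u])
--
--
--     for entry in code_snip:
--
--         if entry:
--             while entry:
--
--                 # entry = sorted(entry, key = lambda x: abs(pad[x][0]-sx)+abs(pad[x][1]-sy))
--
--                 tx,ty = pad[entry.pop(0)]
--
--                 path += move(sx,sy,tx,ty)
--
--                 sx,sy = tx,ty
--
--             tx,ty = pad['A']
--
--             path += move(sx,sy,tx,ty)
--
--             sx,sy = tx,ty
--
--
--     return path
-- ===== SOURCE B (Python) =====
-- def move(sx,sy,tx,ty):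
--     mx,my = tx-sx, ty-sy
--
--     path = ""
--
--     if mx < 0:
--             for i in range(abs(mx)):
--                 path += '^'
--
--     else:
--         for i in range(abs(mx)):
--             path += 'v'
--
--     if my < 0:
--         for i in range(abs(my)):
--             path += '<'
--
--     else:
--         for i in range(abs(my)):
--             path += '>'
--
--
--     path += 'A'
--
--     return path
--
-- def path_control(code, pad):
--     # single pass over the characters; 'moved' tracks whether the current
--     # group has emitted anything since the last flush to 'A'
--     sx, sy = pad['A']
--     path = ""
--     moved = False
--     for c in code:
--         if c == 'A':
--             if moved:
--                 tx, ty = pad['A']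
--                 path += move(sx, sy, tx, ty)
--                 sx, sy = tx, ty
--                 moved = False
--         else:
--             tx, ty = pad[c]
--             path += move(sx, sy, tx, ty)
--             sx, sy = tx, ty
--             moved = True
--     if moved:
--         tx, ty = pad['A']
--         path += move(sx, sy, tx, ty)
--     return path
-- ===== Notes on version B (the rewrite author's own statement) =====
-- stated objective: simpler
-- what changed: Replaced split-on-'A' into a list of groups plus a nested while-loop popping each group with a single pass over the characters of code carrying a 'moved' flag that decides when to emit the flush-to-'A' move.
import Mathlib
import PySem

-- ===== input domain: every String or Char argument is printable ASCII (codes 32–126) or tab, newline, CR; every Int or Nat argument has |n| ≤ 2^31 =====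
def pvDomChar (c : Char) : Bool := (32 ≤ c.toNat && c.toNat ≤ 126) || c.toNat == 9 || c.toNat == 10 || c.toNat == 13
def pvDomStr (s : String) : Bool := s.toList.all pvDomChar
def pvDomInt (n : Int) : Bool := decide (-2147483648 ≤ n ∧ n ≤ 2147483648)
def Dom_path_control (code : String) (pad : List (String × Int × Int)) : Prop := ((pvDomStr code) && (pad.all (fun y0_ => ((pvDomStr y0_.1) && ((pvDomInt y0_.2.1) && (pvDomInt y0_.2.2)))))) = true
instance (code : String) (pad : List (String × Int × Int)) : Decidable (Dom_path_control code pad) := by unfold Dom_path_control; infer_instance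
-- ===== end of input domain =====

-- B replaces A's split-on-'A' + nested while over popped groups by one pass over the
-- characters with a 'moved' flag (simpler decomposition, same cost).

-- ===== PORT A =====

-- dict lookup pad[k]; the default (0,0) is only reached outside Pre_path_control
-- (Python raises KeyError there)
def pgetD (pad : List (String × Int × Int)) (k : String) : Int × Int :=
  (PySem.Dict.mk pad).getD k (0, 0)

-- helper move(sx,sy,tx,ty), shared verbatim by A and B (Source B keeps it byte-identical)
def move (sx sy tx ty : Int) : String :=
  let mx := tx - sx
  let my := ty - sy
  let path := ""
  let path := if mx < 0 then (PySem.List.pyRange 0 |mx| 1).foldl (fun p _ => p ++ "^") path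
              else (PySem.List.pyRange 0 |mx| 1).foldl (fun p _ => p ++ "v") path
  let path := if my < 0 then (PySem.List.pyRange 0 |my| 1).foldl (fun p _ => p ++ "<") path
              else (PySem.List.pyRange 0 |my| 1).foldl (fun p _ => p ++ ">") path
  path ++ "A"

-- the inner 'while entry: tx,ty = pad[entry.pop(0)]; path += move(...)' loop
def pcEntry (pad : List (String × Int × Int)) : List Char → Int × Int × String → Int × Int × String
  | [], st => st
  | c :: rest, (sx, sy, path) =>
    let (tx, ty) := pgetD pad (String.ofList [c])
    pcEntry pad rest (tx, ty, path ++ move sx sy tx ty)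

-- the outer 'for entry in code_snip' loop ('if entry:' skips empty groups)
def pcGroups (pad : List (String × Int × Int)) : List (List Char) → Int × Int × String → String
  | [], (_, _, path) => path
  | g :: gs, st =>
    if g = [] then pcGroups pad gs st
    else
      let (sx, sy, path) := pcEntry pad g st
      let (tx, ty) := pgetD pad "A"
      pcGroups pad gs (tx, ty, path ++ move sx sy tx ty)

-- code.split('A') then list(...) on each piece is the identity on List Char groups
def path_control (code : String) (pad : List (String × Int × Int)) : String :=
  let (sx, sy) := pgetD pad "A"
  pcGroups pad (PySem.Chars.splitOn code.toList ['A']) (sx, sy, "")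

-- ===== PORT B =====

-- one step of B's single pass; state = (sx, sy, moved, path)
def pcStep (pad : List (String × Int × Int)) (st : Int × Int × Bool × String) (c : Char) :
    Int × Int × Bool × String :=
  let (sx, sy, moved, path) := st
  if c = 'A' then
    if moved then
      let (tx, ty) := pgetD pad "A"
      (tx, ty, false, path ++ move sx sy tx ty)
    else st
  else
    let (tx, ty) := pgetD pad (String.ofList [c])
    (tx, ty, true, path ++ move sx sy tx ty)

def path_control_alt (code : String) (pad : List (String × Int × Int)) : String :=
  let (ax, ay) := pgetD pad "A"
  let (sx, sy, moved, path) := code.toList.foldl (pcStep pad) (ax, ay, false, "")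
  if moved then
    let (tx, ty) := pgetD pad "A"
    path ++ move sx sy tx ty
  else path

-- ===== PRECONDITION & SPEC =====
-- Pre_ excludes exactly the inputs on which the Python raises KeyError (both A and B):
-- pad must contain key "A" and a key for every non-'A' character of code.
def Pre_path_control (code : String) (pad : List (String × Int × Int)) : Prop :=
  ((pad.map Prod.fst).contains "A" &&
   code.toList.all (fun c => c == 'A' || (pad.map (fun p => p.1.toList)).contains [c])) = true
instance (code : String) (pad : List (String × Int × Int)) : Decidable (Pre_path_control code pad) := by
  unfold Pre_path_control; infer_instance

def pvWitness_path_control : String × (List (String × Int × Int)) :=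
  ("12A0", [("A", 0, 0), ("0", 3, 1), ("1", 2, 0), ("2", 2, 1)])

def Spec_path_control (code : String) (pad : List (String × Int × Int)) (out : String) : Prop := out = path_control_alt code pad
instance (code : String) (pad : List (String × Int × Int)) (out : String) : Decidable (Spec_path_control code pad out) := by unfold Spec_path_control; infer_instance

-- ===== CLAIM (what is proved, stated in full; the proofs are below) =====
def Claim_equal_path_control : Prop := ∀ (code : String) (pad : List (String × Int × Int)), Dom_path_control code pad → Pre_path_control code pad → Spec_path_control code pad (path_control code pad)

-- ===== LEMMAS AND PROOFS =====

-- recursive characterization of Python's split('A') on a char list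
def splitA : List Char → List (List Char)
  | [] => [[]]
  | c :: t =>
    if c = 'A' then [] :: splitA t
    else match splitA t with
      | g :: gs => (c :: g) :: gs
      | [] => [[c]]

-- prepend a prefix onto the first group
def consHd (x : List Char) : List (List Char) → List (List Char)
  | g :: gs => (x ++ g) :: gs
  | [] => [x]

theorem splitA_ne_nil (l : List Char) : splitA l ≠ [] := by
  cases l with
  | nil => simp [splitA]
  | cons c t =>
    simp only [splitA]
    split
    · simp
    · cases h : splitA t <;> simp

theorem splitOn_go_A (fuel : Nat) :
    ∀ (l cur : List Char) (acc : List (List Char)), l.length < fuel →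
      PySem.Chars.splitOn.go ['A'] fuel l cur acc
        = acc.reverse ++ consHd cur.reverse (splitA l) := by
  induction fuel with
  | zero => intro l cur acc h; omega
  | succ f ih =>
    intro l cur acc h
    cases l with
    | nil => simp [PySem.Chars.splitOn.go, splitA, consHd]
    | cons a rest =>
      obtain ⟨g, gs, hg⟩ : ∃ g gs, splitA rest = g :: gs := by
        cases hx : splitA rest with
        | nil => exact absurd hx (splitA_ne_nil rest)
        | cons g gs => exact ⟨g, gs, rfl⟩
      simp only [PySem.Chars.splitOn.go]
      by_cases hac : a = 'A'
      · subst hac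
        have hp : List.isPrefixOf ['A'] ('A' :: rest) = true := by
          simp [List.isPrefixOf]
        simp only [hp, if_pos]
        have hdrop : List.drop (['A'].length) ('A' :: rest) = rest := rfl
        rw [hdrop, ih rest [] _ (by simpa using Nat.lt_of_succ_lt_succ h)]
        simp [splitA, consHd, hg]
      · have hp : List.isPrefixOf ['A'] (a :: rest) = false := by
          simp only [List.isPrefixOf, Bool.and_eq_false_iff, beq_eq_false_iff_ne, ne_eq]
          exact Or.inl (fun hh => hac hh.symm)
        simp only [hp, Bool.false_eq_true, if_neg, not_false_iff]
        rw [ih rest (a :: cur) _ (by simpa using Nat.lt_of_succ_lt_succ h)]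
        simp [splitA, consHd, hac, hg]

theorem splitOn_eq_splitA (l : List Char) :
    PySem.Chars.splitOn l ['A'] = splitA l := by
  rw [PySem.Chars.splitOn, splitOn_go_A (l.length + 1) l [] [] (by omega)]
  obtain ⟨g, gs, hg⟩ : ∃ g gs, splitA l = g :: gs := by
    cases hx : splitA l with
    | nil => exact absurd hx (splitA_ne_nil l)
    | cons g gs => exact ⟨g, gs, rfl⟩
  simp [consHd, hg]

-- B's final flush
def bFin (pad : List (String × Int × Int)) (st : Int × Int × Bool × String) : String :=
  let (sx, sy, moved, path) := st
  if moved then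
    let (tx, ty) := pgetD pad "A"
    path ++ move sx sy tx ty
  else path

-- A's flush of one (possibly empty) group
def pcFlush (pad : List (String × Int × Int)) (g : List Char) (st : Int × Int × String) :
    Int × Int × String :=
  let (sx, sy, path) := pcEntry pad g st
  let (tx, ty) := pgetD pad "A"
  (tx, ty, path ++ move sx sy tx ty)

-- A's group loop with the first group forced to flush (the B-scan is mid-group)
def pcGroupsF (pad : List (String × Int × Int)) : List (List Char) → Int × Int × String → String
  | [], (_, _, path) => path
  | g :: gs, st => pcGroups pad gs (pcFlush pad g st)

theorem pcGroups_cons_ne (pad : List (String × Int × Int)) (g : List Char) (gs : List (List Char))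
    (st : Int × Int × String) (h : g ≠ []) :
    pcGroups pad (g :: gs) st = pcGroups pad gs (pcFlush pad g st) := by
  obtain ⟨sx, sy, path⟩ := st
  simp only [pcGroups, if_neg h, pcFlush]

-- the core invariant: B's scan with moved=false matches A's group loop on splitA,
-- and with moved=true matches the forced-first-flush variant
theorem scan_eq_groups (pad : List (String × Int × Int)) (cs : List Char) :
    ∀ (sx sy : Int) (path : String),
      bFin pad (cs.foldl (pcStep pad) (sx, sy, false, path))
        = pcGroups pad (splitA cs) (sx, sy, path)
      ∧ bFin pad (cs.foldl (pcStep pad) (sx, sy, true, path))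
        = pcGroupsF pad (splitA cs) (sx, sy, path) := by
  induction cs with
  | nil =>
    intro sx sy path
    constructor
    · simp [bFin, splitA, pcGroups]
    · simp [bFin, splitA, pcGroupsF, pcFlush, pcEntry, pcGroups]
  | cons c t ih =>
    intro sx sy path
    by_cases hc : c = 'A'
    · subst hc
      have h1 : pcStep pad (sx, sy, false, path) 'A' = (sx, sy, false, path) := by
        simp [pcStep]
      have h2 : pcStep pad (sx, sy, true, path) 'A'
          = ((pgetD pad "A").1, (pgetD pad "A").2, false,
             path ++ move sx sy (pgetD pad "A").1 (pgetD pad "A").2) := by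
        simp [pcStep]
      constructor
      · -- moved = false: stray 'A' ignored; A skips the empty group
        simp only [List.foldl, h1]
        rw [(ih sx sy path).1]
        simp [splitA, pcGroups]
      · -- moved = true: B flushes; A flushes the (empty-remainder) group
        simp only [List.foldl, h2]
        rw [(ih _ _ _).1]
        simp [splitA, pcGroupsF, pcFlush, pcEntry]
    · obtain ⟨g, gs, hgs⟩ : ∃ g gs, splitA t = g :: gs := by
        cases hx : splitA t with
        | nil => exact absurd hx (splitA_ne_nil t)
        | cons g gs => exact ⟨g, gs, rfl⟩
      have hsplit : splitA (c :: t) = (c :: g) :: gs := by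
        simp only [splitA, if_neg hc, hgs]
      have hstep : ∀ m : Bool, pcStep pad (sx, sy, m, path) c
          = ((pgetD pad (String.ofList [c])).1, (pgetD pad (String.ofList [c])).2, true,
             path ++ move sx sy (pgetD pad (String.ofList [c])).1 (pgetD pad (String.ofList [c])).2) := by
        intro m; simp [pcStep, hc]
      have hflush : ∀ st : Int × Int × String,
          pcFlush pad (c :: g) st = pcFlush pad g (pcEntry pad [c] st) := by
        intro st; obtain ⟨a, b, p⟩ := st
        simp only [pcFlush, pcEntry]
      constructor
      · simp only [List.foldl, hstep]
        rw [(ih _ _ _).2, hsplit, hgs]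
        rw [pcGroups_cons_ne pad (c :: g) gs _ (by simp)]
        rw [hflush]
        simp only [pcGroupsF, pcEntry]
      · simp only [List.foldl, hstep]
        rw [(ih _ _ _).2, hsplit, hgs]
        simp only [pcGroupsF]
        rw [hflush]
        simp only [pcEntry]

-- ===== VERDICT (by name: the statement is the Claim_ definition above) =====
theorem path_control_spec : Claim_equal_path_control := by
  intro code pad _ _
  unfold Spec_path_control path_control path_control_alt
  rw [splitOn_eq_splitA]
  rcases hA : pgetD pad "A" with ⟨ax, ay⟩
  have h := (scan_eq_groups pad code.toList ax ay "").1
  simp only [bFin] at h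
  rcases hF : code.toList.foldl (pcStep pad) (ax, ay, false, "") with ⟨sx, sy, moved, path⟩
  simp only [hA, hF] at h ⊢
  exact h.symm
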